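-- pv_equiv track=rewrite | github.com/sassoncharlotte/Cartable-Fantastique | fantastic/exercises/utils.py | index_words
-- ===== SOURCE A (Python) =====
-- def index_words(guideline: str, categories: list) -> list:
--     """Returns the indexes of the words that we need to frame and color in the guideline.
--
--     Parameters:
--     - guideline
--     - categories: the different categories in the guideline
--     Returns:
--     - word_indexes_list: the list of the indexes of the categories in the guideline
--     It has the form: [(n1, n2), (n3, n4) ...] with n1 the number of spaces before the first letter of word1
--     and n2 the number of spaces before the last letter of word 1"""
--
--     word_indexs_list = []
--     index_dots = guideline.find(":")
--
--     for category in categories: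
--
--         # searching for categories after a ":" if there is one, and
--         # if not, in the whole guideline
--         if index_dots != -1:
--             # there is a ":"
--             # so we want to search for the categories after the ":"
--             index_set = (
--                 guideline.find(category, index_dots),
--                 guideline.find(category, index_dots) + len(category) - 1,
--             )
--         else:
--             # we search for the categories in the whole guideline
--             index_set = (
--                 guideline.find(category),
--                 guideline.find(category) + len(category) - 1,
--             )
--
--         word_indexs_list += [
--             (guideline[: index_set[0]].count(" "), guideline[: index_set[1]].count(" "))
--         ]
--     return word_indexs_list
-- ===== SOURCE B (Python) =====
-- def index_words(guideline: str, categories: list) -> list: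
--     """Same result as A: for each category, the number of spaces before its
--     first and last letter in the guideline, searching after a ":" if present.
--     B precomputes one prefix table of space counts, so each category costs two
--     O(1) lookups instead of two slice-and-count passes."""
--     n = len(guideline)
--     prefix = [0]
--     for ch in guideline:
--         prefix.append(prefix[-1] + (1 if ch == ' ' else 0))
--
--     def spaces_before(i):
--         # spaces in guideline[:i], with Python slice semantics for negative i
--         if i < 0:
--             i = max(n + i, 0)
--         return prefix[min(i, n)]
--
--     colon = guideline.find(":")
--     start = colon if colon != -1 else 0
--     result = []
--     for category in categories:
--         s = guideline.find(category, start)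
--         e = s + len(category) - 1
--         result.append((spaces_before(s), spaces_before(e)))
--     return result
-- ===== Notes on version B (the rewrite author's own statement) =====
-- stated objective: alternative
-- what changed: B precomputes a single prefix-sum table of space counts over the guideline and answers each category's two 'spaces before index' queries by an O(1) clamped table lookup, instead of A's per-category slicing and counting of the guideline.
import Mathlib
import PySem

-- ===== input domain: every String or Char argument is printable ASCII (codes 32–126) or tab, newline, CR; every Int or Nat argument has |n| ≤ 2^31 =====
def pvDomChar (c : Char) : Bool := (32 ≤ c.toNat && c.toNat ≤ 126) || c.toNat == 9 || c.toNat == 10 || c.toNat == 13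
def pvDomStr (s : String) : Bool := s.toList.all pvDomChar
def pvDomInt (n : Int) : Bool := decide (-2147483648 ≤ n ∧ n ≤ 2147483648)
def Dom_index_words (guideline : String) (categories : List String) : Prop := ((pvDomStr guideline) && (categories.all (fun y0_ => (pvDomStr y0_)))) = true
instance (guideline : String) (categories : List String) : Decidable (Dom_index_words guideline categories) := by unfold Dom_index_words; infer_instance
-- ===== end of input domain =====

-- B replaces A's per-category slice-and-count passes by one precomputed prefix table of
-- space counts consulted in O(1); return values are proved identical (alternative/constant-factor).

-- ===== PORT A =====
def index_words (guideline : String) (categories : List String) : List (Int × Int) :=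
  let indexDots := PySem.Str.find guideline ":"
  categories.foldl (fun word_indexs_list category =>
    let indexSet : Int × Int :=
      if indexDots ≠ -1 then
        (PySem.Str.findFrom guideline category indexDots,
         PySem.Str.findFrom guideline category indexDots + PySem.Str.len category - 1)
      else
        (PySem.Str.find guideline category,
         PySem.Str.find guideline category + PySem.Str.len category - 1)
    word_indexs_list ++
      [((PySem.Str.count (PySem.Str.slice guideline none (some indexSet.1)) " " : Int),
        (PySem.Str.count (PySem.Str.slice guideline none (some indexSet.2)) " " : Int))]) []

-- ===== PORT B =====
def index_words_alt (guideline : String) (categories : List String) : List (Int × Int) :=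
  let n : Int := PySem.Str.len guideline
  -- prefix[j] = number of spaces in guideline[:j], built in one pass
  let prefixTbl : List Int :=
    guideline.toList.foldl
      (fun P ch => P ++ [P.getLast! + (if ch == ' ' then (1 : Int) else 0)]) [0]
  let spacesBefore : Int → Int := fun i =>
    let i' := if i < 0 then max (n + i) 0 else i
    prefixTbl.getD (min i' n).toNat 0
  let colon := PySem.Str.find guideline ":"
  let start := if colon ≠ -1 then colon else 0
  categories.foldl (fun result category =>
    let s := PySem.Str.findFrom guideline category start
    let e := s + PySem.Str.len category - 1
    result ++ [(spacesBefore s, spacesBefore e)]) []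

-- ===== PRECONDITION & SPEC =====
def Spec_index_words (guideline : String) (categories : List String) (out : List (Int × Int)) : Prop := out = index_words_alt guideline categories
instance (guideline : String) (categories : List String) (out : List (Int × Int)) : Decidable (Spec_index_words guideline categories out) := by unfold Spec_index_words; infer_instance

-- ===== CLAIM (what is proved, stated in full; the proofs are below) =====
def Claim_equal_index_words : Prop := ∀ (guideline : String) (categories : List String), Dom_index_words guideline categories → Spec_index_words guideline categories (index_words guideline categories)

-- ===== LEMMAS AND PROOFS =====

-- Python's s.count(c) for a single character c is the element count
lemma count_go_single (c : Char) : ∀ (fuel : Nat) (l : List Char) (acc : Nat),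
    l.length ≤ fuel → PySem.Chars.count.go [c] fuel l acc = acc + l.count c := by
  intro fuel
  induction fuel with
  | zero =>
    intro l acc h
    have : l = [] := List.eq_nil_of_length_eq_zero (Nat.le_zero.mp h)
    subst this; simp [PySem.Chars.count.go]
  | succ f ih =>
    intro l acc h
    cases l with
    | nil => simp [PySem.Chars.count.go]
    | cons hd t =>
      rw [PySem.Chars.count.go]
      simp only [List.isPrefixOf, List.length_cons] at *
      by_cases hc : c == hd
      · rw [if_pos (by simp [hc])]
        rw [show List.drop (List.length ([] : List Char) + 1) (hd :: t) = t from rfl]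
        rw [ih t (acc + 1) (by omega)]
        have hhd : hd = c := (beq_iff_eq.mp hc).symm
        simp [hhd]
        omega
      · rw [if_neg (by simp [hc])]
        rw [ih t acc (by omega)]
        have : ¬ hd = c := fun h' => hc (by simp [h'])
        simp [this]

lemma chars_count_single (cs : List Char) (c : Char) :
    PySem.Chars.count cs [c] = cs.count c := by
  rw [PySem.Chars.count]
  simp only [List.isEmpty_cons, if_false, Bool.false_eq_true]
  rw [count_go_single c cs.length cs 0 le_rfl]
  omega

-- the prefix table built by B's loop, characterised
lemma table_eq (cs : List Char) :
    cs.foldl (fun P ch => P ++ [P.getLast! + (if ch == ' ' then (1 : Int) else 0)]) [0]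
      = (List.range (cs.length + 1)).map (fun j => ((cs.take j).count ' ' : Int)) := by
  induction cs using List.reverseRecOn with
  | nil => simp [List.range_succ]
  | append_singleton cs c ih =>
    rw [List.foldl_append, ih]
    simp only [List.foldl_cons, List.foldl_nil]
    have hlen : (cs ++ [c]).length = cs.length + 1 := by simp
    rw [hlen, List.range_succ (n := cs.length + 1), List.map_append]
    congr 1
    · apply List.map_congr_left
      intro j hj
      have hj' : j ≤ cs.length := by
        have := List.mem_range.mp hj; omega
      rw [List.take_append_of_le_length hj']
    · have hlast : ((List.range (cs.length + 1)).map
          (fun j => ((cs.take j).count ' ' : Int))).getLast!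
          = ((cs.count ' ' : Int)) := by
        rw [List.range_succ, List.map_append]
        simp
      rw [hlast]
      simp only [List.map_cons, List.map_nil]
      congr 1
      rw [List.take_of_length_le (by simp)]
      rw [List.count_append]
      push_cast
      congr 1
      by_cases hc : c == ' '
      · have : c = ' ' := beq_iff_eq.mp hc
        simp [this]
      · have : ¬ c = ' ' := fun h' => hc (by simp [h'])
        simp [this, hc]

lemma getD_map_range (f : Nat → Int) (n m : Nat) (h : m ≤ n) :
    ((List.range (n + 1)).map f).getD m 0 = f m := by
  have hm : m < n + 1 := by omega
  simp [List.getD, List.getElem?_map, List.getElem?_range hm]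

lemma clamp_eq (n : Nat) (i : Int) :
    (min (if i < 0 then max ((n : Int) + i) 0 else i) (n : Int)).toNat
      = PySem.List.clampIdx n i := by
  unfold PySem.List.clampIdx
  split_ifs <;> omega

lemma slice_to_take (cs : List Char) (i : Int) :
    PySem.List.slice cs none (some i) = cs.take (PySem.List.clampIdx cs.length i) := by
  simp [PySem.List.slice]

-- A's "count spaces in guideline[:i]" equals B's table lookup
lemma spaces_eq (g : String) (i : Int) :
    (PySem.Str.count (PySem.Str.slice g none (some i)) " " : Int)
      = (g.toList.foldl
            (fun P ch => P ++ [P.getLast! + (if ch == ' ' then (1 : Int) else 0)]) [0]).getD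
          ((min (if i < 0 then max ((PySem.Str.len g) + i) 0 else i) (PySem.Str.len g)).toNat) 0 := by
  rw [PySem.Str.count_eq, PySem.Str.toList_slice]
  rw [show (" " : String).toList = [' '] from rfl]
  rw [PySem.Chars.slice_eq_listSlice]
  rw [chars_count_single, slice_to_take, table_eq, PySem.Str.len_eq, clamp_eq]
  rw [getD_map_range _ _ _ (by unfold PySem.List.clampIdx; split_ifs <;> omega)]

-- ===== VERDICT (by name: the statement is the Claim_ definition above) =====
theorem index_words_spec : Claim_equal_index_words := by
  intro g cats _
  unfold Spec_index_words index_words index_words_alt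
  dsimp only
  congr 1
  funext acc cat
  dsimp only
  by_cases hc : PySem.Str.find g ":" ≠ -1
  · rw [if_pos hc, if_pos hc]
    rw [spaces_eq, spaces_eq]
  · rw [if_neg hc, if_neg hc]
    rw [spaces_eq, spaces_eq]
    rw [PySem.Str.findFrom_eq, PySem.Chars.findFrom_zero, ← PySem.Str.find_eq]
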